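-- pv_equiv track=rewrite | github.com/phamngoctan/python-playground | leetcode/smallest_string_with_a_given_numeric_value.py | getSmallestString_fromSuggestion
-- ===== SOURCE A (Python) =====
-- def getSmallestString_fromSuggestion(n: int, k: int) -> str:
--     """This solution idea is good but not efficient.
--     It can run in O(n) while the idea is that
--     we just need to cover all the Z characters and one remaining
--         value of min(k, 25)
--     """
--     ans = ""
--     while k > 0:
--         maxCur = k - (n - 1)
--         if maxCur >= 26:
--             ans = "z" + ans
--             k -= 26
--         else:
--             ans = chr(ord('a') - 1 + maxCur) + ans
--             k -= maxCur
--         n -= 1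
--     return ans
-- ===== SOURCE B (Python) =====
-- def getSmallestString_fromSuggestion(n: int, k: int) -> str:
--     """Closed form: fill with 'a', then each trailing 'z' adds 25 to the sum;
--     one middle character absorbs the remainder."""
--     if k <= 0:
--         return ""
--     z, rem = divmod(k - n, 25)
--     if rem == 0:
--         return "a" * (n - z) + "z" * z
--     return "a" * (n - z - 1) + chr(97 + rem) + "z" * z
-- ===== Notes on version B (the rewrite author's own statement) =====
-- stated objective: simpler
-- what changed: A builds the answer character by character in a while loop with repeated string prepending; B computes the count of trailing z's and the one middle character with a single divmod and emits the string via string repetition. Pre_ restricts to the natural domain (k <= 0, where A returns '', or n <= k <= 26*n, where a length-n lowercase string summing to k exists); outside it A either raises ValueError (chr of a negative number) or returns loop-artefact strings of the wrong length.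
-- outside the precondition, e.g. on getSmallestString_fromSuggestion(0, 26): A returns 'z', B returns 'bz'
import Mathlib
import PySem

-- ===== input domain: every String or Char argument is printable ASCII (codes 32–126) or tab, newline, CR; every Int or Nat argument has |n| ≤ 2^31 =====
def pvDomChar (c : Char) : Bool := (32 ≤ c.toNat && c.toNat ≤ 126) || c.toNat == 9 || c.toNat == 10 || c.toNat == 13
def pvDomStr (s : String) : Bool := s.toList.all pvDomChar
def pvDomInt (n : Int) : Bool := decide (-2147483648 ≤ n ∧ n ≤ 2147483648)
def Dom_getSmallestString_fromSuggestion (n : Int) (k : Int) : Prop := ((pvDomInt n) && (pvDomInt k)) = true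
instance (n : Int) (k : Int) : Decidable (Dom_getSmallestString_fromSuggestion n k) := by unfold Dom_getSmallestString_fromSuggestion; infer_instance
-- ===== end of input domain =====

-- B replaces A's per-character loop (with repeated string prepending) by a single divmod
-- giving the z-count and the middle character; objective: simpler (a closed form, no loop).

-- ===== PORT A =====
-- A's while loop, building the string (as a list of chars) by prepending, as structural
-- recursion on a fuel bounding the iteration count (the measure k.toNat + (n-k).toNat
-- strictly decreases each iteration, see pvGo_spec); chr(ord('a') - 1 + maxCur) is ported
-- as Char.ofNat (96 + maxCur).toNat (exact for 0 ≤ 96 + maxCur; Python's chr raises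
-- ValueError on a negative argument, which Pre_ excludes)
def pvGoA (fuel : Nat) (n : Int) (k : Int) (ans : List Char) : List Char :=
  match fuel with
  | 0 => ans
  | fuel + 1 =>
    if k > 0 then
      if k - (n - 1) ≥ 26 then
        pvGoA fuel (n - 1) (k - 26) ('z' :: ans)
      else
        pvGoA fuel (n - 1) (k - (k - (n - 1))) (Char.ofNat (96 + (k - (n - 1))).toNat :: ans)
    else ans

def getSmallestString_fromSuggestion (n : Int) (k : Int) : String :=
  String.mk (pvGoA (k.toNat + (n - k).toNat + 1) n k [])

-- ===== PORT B =====
-- "a" * m (Python string repetition, empty for m ≤ 0)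
def pvRep (c : Char) (m : Int) : List Char := List.replicate m.toNat c

def getSmallestString_fromSuggestion_alt (n : Int) (k : Int) : String :=
  if k ≤ 0 then "" else
  let z := PySem.Int.floordiv (k - n) 25
  let rem := PySem.Int.mod (k - n) 25
  if rem = 0 then String.mk (pvRep 'a' (n - z) ++ pvRep 'z' z)
  else String.mk (pvRep 'a' (n - z - 1) ++ [Char.ofNat (97 + rem).toNat] ++ pvRep 'z' z)

-- ===== PRECONDITION & SPEC =====
-- Pre_ restricts to the natural domain: k ≤ 0 (A returns "") or n ≤ k ≤ 26*n, exactly the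
-- inputs where some length-n lowercase string has value sum k; outside it A either raises
-- ValueError (chr of a negative number, when k > 0 and k - n + 1 ≤ -97) or returns
-- loop-artefact strings of the wrong length.
def Pre_getSmallestString_fromSuggestion (n : Int) (k : Int) : Prop :=
  k ≤ 0 ∨ (n ≤ k ∧ k ≤ 26 * n)
instance (n : Int) (k : Int) : Decidable (Pre_getSmallestString_fromSuggestion n k) := by
  unfold Pre_getSmallestString_fromSuggestion; infer_instance
def pvWitness_getSmallestString_fromSuggestion : Int × Int := (3, 5)

def Spec_getSmallestString_fromSuggestion (n : Int) (k : Int) (out : String) : Prop := out = getSmallestString_fromSuggestion_alt n k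
instance (n : Int) (k : Int) (out : String) : Decidable (Spec_getSmallestString_fromSuggestion n k out) := by unfold Spec_getSmallestString_fromSuggestion; infer_instance

-- ===== CLAIM (what is proved, stated in full; the proofs are below) =====
def Claim_equal_getSmallestString_fromSuggestion : Prop := ∀ (n : Int) (k : Int), Dom_getSmallestString_fromSuggestion n k → Pre_getSmallestString_fromSuggestion n k → Spec_getSmallestString_fromSuggestion n k (getSmallestString_fromSuggestion n k)

-- ===== LEMMAS AND PROOFS =====

-- B's closed form as a list of chars, with floordiv/mod turned into Int./ and Int.%
def pvBL (n : Int) (k : Int) : List Char :=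
  if k ≤ 0 then [] else
  if (k - n) % 25 = 0 then pvRep 'a' (n - (k - n) / 25) ++ pvRep 'z' ((k - n) / 25)
  else pvRep 'a' (n - (k - n) / 25 - 1) ++ [Char.ofNat (97 + (k - n) % 25).toNat]
         ++ pvRep 'z' ((k - n) / 25)

theorem pvAlt_eq_BL (n k : Int) :
    getSmallestString_fromSuggestion_alt n k = String.mk (pvBL n k) := by
  simp only [getSmallestString_fromSuggestion_alt, pvBL,
    PySem.Int.floordiv_eq_ediv_of_pos (a := k - n) (b := 25) (by norm_num),
    PySem.Int.mod_eq_emod_of_pos (a := k - n) (b := 25) (by norm_num)]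
  split_ifs <;> rfl

theorem pvBL_z (n k : Int) (hk : 0 < k) (hn : n ≤ k) (h26 : k ≤ 26 * n)
    (hz : 26 ≤ k - n + 1) :
    pvBL n k = pvBL (n - 1) (k - 26) ++ ['z'] := by
  have hq1 : 1 ≤ (k - n) / 25 := by omega
  have hdiv : (k - 26 - (n - 1)) / 25 = (k - n) / 25 - 1 := by omega
  by_cases hlast : k - 26 ≤ 0
  · -- then k = 26 and n = 1: a single 'z'
    have hk26 : k = 26 := by omega
    have hn1 : n = 1 := by omega
    subst hk26; subst hn1
    decide
  · by_cases hr : (k - n) % 25 = 0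
    · -- rem = 0 on both sides: peel one 'z'
      unfold pvBL
      rw [if_neg (by omega), if_pos hr, if_neg (by omega), if_pos (by omega)]
      simp only [pvRep, hdiv]
      rw [show ((k - n) / 25).toNat = ((k - n) / 25 - 1).toNat + 1 by omega,
          show (n - (k - n) / 25).toNat = (n - 1 - ((k - n) / 25 - 1)).toNat by omega,
          List.replicate_succ']
      simp [List.append_assoc]
    · -- rem ≠ 0 on both sides: peel one 'z', same middle character
      unfold pvBL
      rw [if_neg (by omega), if_neg hr, if_neg (by omega), if_neg (by omega)]
      simp only [pvRep, hdiv]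
      rw [show (k - 26 - (n - 1)) % 25 = (k - n) % 25 by omega,
          show ((k - n) / 25).toNat = ((k - n) / 25 - 1).toNat + 1 by omega,
          show (n - (k - n) / 25 - 1).toNat = (n - 1 - ((k - n) / 25 - 1) - 1).toNat by omega,
          List.replicate_succ']
      simp [List.append_assoc]

theorem pvBL_mid (n k : Int) (hk : 0 < k) (hn : n ≤ k) (h26 : k ≤ 26 * n)
    (hm : k - n + 1 < 26) :
    pvBL n k = pvBL (n - 1) (n - 1) ++ [Char.ofNat (96 + (k - n + 1)).toNat] := by
  have hn1 : 1 ≤ n := by omega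
  have hdiv : (k - n) / 25 = 0 := by omega
  by_cases heq : k = n
  · -- all-'a' string: split the last 'a' off
    subst heq
    unfold pvBL
    by_cases h1 : k - 1 ≤ 0
    · rw [if_neg (by omega), if_pos (by omega), if_pos h1]
      simp only [pvRep]
      rw [show ((k - k) / 25 : Int) = 0 by omega,
          show (k - 0).toNat = 1 by omega,
          show (96 + (k - k + 1)).toNat = 97 by omega]
      decide
    · rw [if_neg (by omega), if_pos (by omega), if_neg h1, if_pos (by omega)]
      simp only [pvRep]
      rw [show ((k - k) / 25 : Int) = 0 by omega,
          show ((k - 1 - (k - 1)) / 25 : Int) = 0 by omega,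
          show (k - 0).toNat = (k - 1 - 0).toNat + 1 by omega,
          List.replicate_succ',
          show (96 + (k - k + 1)).toNat = 97 by omega]
      simp
  · -- k > n: 'a'-prefix plus the middle character
    have hr : (k - n) % 25 = k - n := by omega
    unfold pvBL
    by_cases h1 : n - 1 ≤ 0
    · rw [if_neg (by omega), if_neg (by omega), if_pos h1]
      simp only [pvRep, hdiv]
      rw [show (n - 0 - 1).toNat = 0 by omega,
          show (97 + (k - n) % 25).toNat = (96 + (k - n + 1)).toNat by omega]
      simp
    · rw [if_neg (by omega), if_neg (by omega), if_neg h1, if_pos (by omega)]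
      simp only [pvRep, hdiv]
      rw [show ((n - 1 - (n - 1)) / 25 : Int) = 0 by omega,
          show (97 + (k - n) % 25).toNat = (96 + (k - n + 1)).toNat by omega,
          show (n - 0 - 1).toNat = (n - 1 - 0).toNat by omega]
      simp

theorem pvGo_spec (fuel : Nat) (n k : Int) (ans : List Char)
    (hf : k.toNat + (n - k).toNat < fuel)
    (hinv : k ≤ 0 ∨ (n ≤ k ∧ k ≤ 26 * n)) :
    pvGoA fuel n k ans = pvBL n k ++ ans := by
  induction fuel generalizing n k ans with
  | zero => omega
  | succ fuel ih =>
    rw [pvGoA]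
    by_cases h1 : k > 0
    · have hnk : n ≤ k ∧ k ≤ 26 * n := by omega
      by_cases h2 : k - (n - 1) ≥ 26
      · rw [if_pos h1, if_pos h2, ih _ _ _ (by omega) (by omega),
            pvBL_z n k h1 hnk.1 hnk.2 (by omega)]
        simp
      · rw [if_pos h1, if_neg h2, ih _ _ _ (by omega) (by omega),
            show k - (k - (n - 1)) = n - 1 by ring, pvBL_mid n k h1 hnk.1 hnk.2 (by omega)]
        simp
        exact congrArg Char.ofNat (by omega)
    · rw [if_neg h1, show pvBL n k = [] by unfold pvBL; rw [if_pos (by omega)]]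
      rfl

-- ===== VERDICT (by name: the statements are the Claim_ definitions above) =====
theorem getSmallestString_fromSuggestion_spec : Claim_equal_getSmallestString_fromSuggestion := by
  intro n k _ hpre
  unfold Spec_getSmallestString_fromSuggestion getSmallestString_fromSuggestion
  rw [pvAlt_eq_BL, pvGo_spec _ n k [] (by omega) hpre, List.append_nil]
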